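-- pv_equiv track=rewrite | github.com/ArturoArroyo19/Juego-de-ping-pong | Lista ejercicio.py | convertir_lista_a_mayusculas
-- ===== SOURCE A (Python) =====
-- def convertir_lista_a_mayusculas(lista):
--     def convertir_mayusculas(cadena):
--         resultado = ""
--         for caracter in cadena:
--             if 'a' <= caracter <= 'z':
--                 resultado += chr(ord(caracter) - 32)
--             else:
--                 resultado += caracter
--         return resultado
--
--     return [convertir_mayusculas(cadena) for cadena in lista]
-- ===== SOURCE B (Python) =====
-- _TABLA = str.maketrans('abcdefghijklmnopqrstuvwxyz', 'ABCDEFGHIJKLMNOPQRSTUVWXYZ')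
--
-- def convertir_lista_a_mayusculas(lista):
--     return [cadena.translate(_TABLA) for cadena in lista]
-- ===== Notes on version B (the rewrite author's own statement) =====
-- stated objective: idiomatic
-- what changed: Replaces the per-character compare-and-subtract-32 loop with quadratic string concatenation by a translation table built once with str.maketrans over the 26 ASCII lowercase letters, applied with str.translate.
import Mathlib
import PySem

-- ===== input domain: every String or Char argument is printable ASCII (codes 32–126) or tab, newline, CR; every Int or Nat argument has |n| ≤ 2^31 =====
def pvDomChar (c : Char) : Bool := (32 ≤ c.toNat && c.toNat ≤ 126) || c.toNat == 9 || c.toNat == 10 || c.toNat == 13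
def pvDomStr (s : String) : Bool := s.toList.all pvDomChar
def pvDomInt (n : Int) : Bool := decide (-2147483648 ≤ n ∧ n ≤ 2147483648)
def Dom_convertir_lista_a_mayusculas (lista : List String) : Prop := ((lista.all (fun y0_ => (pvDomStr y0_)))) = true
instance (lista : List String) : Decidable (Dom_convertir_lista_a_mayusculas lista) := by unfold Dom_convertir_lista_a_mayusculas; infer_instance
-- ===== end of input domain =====

-- B builds a str.maketrans table once (the 26 ASCII lowercase letters) and applies it with
-- str.translate, instead of A's per-character compare-and-subtract-32 loop with string concatenation.


-- ===== PORT A =====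
-- inner helper convertir_mayusculas: left fold over the characters, appending to 'resultado'
def pvConvertirMayusculas (cadena : String) : String :=
  String.mk (cadena.toList.foldl
    (fun resultado caracter =>
      if 'a' ≤ caracter ∧ caracter ≤ 'z' then
        resultado ++ [Char.ofNat (caracter.toNat - 32)]
      else
        resultado ++ [caracter]) [])

def convertir_lista_a_mayusculas (lista : List String) : List String :=
  lista.map (fun cadena => pvConvertirMayusculas cadena)

-- ===== PORT B =====
-- str.maketrans('abc…z', 'ABC…Z'): an ord→ord association table built once by zipping the two strings
def pvTabla : List (Int × Int) :=
  (List.zip "abcdefghijklmnopqrstuvwxyz".toList "ABCDEFGHIJKLMNOPQRSTUVWXYZ".toList).map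
    (fun p => ((p.1.toNat : Int), (p.2.toNat : Int)))

-- str.translate: each character is looked up by its code point; unmapped characters pass through
def pvTranslateChar (c : Char) : Char :=
  match pvTabla.lookup ((c.toNat : Int)) with
  | some v => Char.ofNat v.toNat
  | none => c

def pvTranslate (cadena : String) : String :=
  String.mk (cadena.toList.map pvTranslateChar)

def convertir_lista_a_mayusculas_alt (lista : List String) : List String :=
  lista.map (fun cadena => pvTranslate cadena)

-- ===== PRECONDITION & SPEC =====
def Spec_convertir_lista_a_mayusculas (lista : List String) (out : List String) : Prop := out = convertir_lista_a_mayusculas_alt lista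
instance (lista : List String) (out : List String) : Decidable (Spec_convertir_lista_a_mayusculas lista out) := by unfold Spec_convertir_lista_a_mayusculas; infer_instance

-- ===== CLAIM (what is proved, stated in full; the proofs are below) =====
def Claim_equal_convertir_lista_a_mayusculas : Prop := ∀ (lista : List String), Dom_convertir_lista_a_mayusculas lista → Spec_convertir_lista_a_mayusculas lista (convertir_lista_a_mayusculas lista)

-- ===== LEMMAS AND PROOFS =====

-- A's per-character step, as a function
def pvStepA (c : Char) : Char :=
  if 'a' ≤ c ∧ c ≤ 'z' then Char.ofNat (c.toNat - 32) else c

-- the two per-character transformations agree on every code point ≤ 126 (checked exhaustively)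
set_option maxRecDepth 4000 in
lemma step_eq_fin : ∀ n : Fin 127, pvStepA (Char.ofNat n.val) = pvTranslateChar (Char.ofNat n.val) := by
  decide

lemma step_eq (c : Char) (h : pvDomChar c = true) : pvStepA c = pvTranslateChar c := by
  have hle : c.toNat ≤ 126 := by
    simp [pvDomChar] at h
    omega
  have := step_eq_fin ⟨c.toNat, Nat.lt_succ_of_le hle⟩
  simpa [Char.ofNat_toNat] using this

-- A's append-accumulator fold is the map of its step
lemma foldl_append_map (l : List Char) (acc : List Char) :
    l.foldl (fun r c => r ++ [pvStepA c]) acc = acc ++ l.map pvStepA := by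
  induction l generalizing acc with
  | nil => simp
  | cons c l ih => simp [List.foldl_cons, ih]

lemma convertir_eq (cadena : String) (h : pvDomStr cadena = true) :
    pvConvertirMayusculas cadena = pvTranslate cadena := by
  have hfold : pvConvertirMayusculas cadena = String.mk (cadena.toList.map pvStepA) := by
    unfold pvConvertirMayusculas pvStepA
    rw [show (fun (resultado : List Char) (caracter : Char) =>
          if 'a' ≤ caracter ∧ caracter ≤ 'z' then resultado ++ [Char.ofNat (caracter.toNat - 32)]
          else resultado ++ [caracter])
        = (fun r c => r ++ [pvStepA c]) from by
          funext r c; unfold pvStepA; split <;> rfl]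
    rw [foldl_append_map]
    rfl
  rw [hfold]
  unfold pvTranslate
  congr 1
  apply List.map_congr_left
  intro c hc
  exact step_eq c (by simp [pvDomStr, List.all_eq_true] at h; exact h c hc)

-- ===== VERDICT (by name: the statement is the Claim_ definition above) =====
theorem convertir_lista_a_mayusculas_spec : Claim_equal_convertir_lista_a_mayusculas := by
  intro lista hdom
  unfold Spec_convertir_lista_a_mayusculas convertir_lista_a_mayusculas convertir_lista_a_mayusculas_alt
  apply List.map_congr_left
  intro s hs
  simp [Dom_convertir_lista_a_mayusculas, List.all_eq_true] at hdom
  exact convertir_eq s (hdom s hs)
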